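-- pv_equiv track=rewrite | github.com/pypi-data/pypi-mirror-52 | packages/metascholar/metascholar-0.1.0.5.tar.gz/metascholar-0.1.0.5/metascholar/metadata.py | _ISBN_list_transformer
-- ===== SOURCE A (Python) =====
-- def _ISBN_list_transformer(ISBN):
--     ISBN_print = ""
--     ISBN_digital =  ""
--     for i in ISBN:
--         if i["type"] == "print":
--             ISBN_print = i["value"]
--         if i["type"] == "electronic":
--             ISBN_digital = i["value"]
--     return(ISBN_print,ISBN_digital)
-- ===== SOURCE B (Python) =====
-- def _ISBN_list_transformer(ISBN):
--     # Idiomatic rewrite: last matching entry per type via a reverse scan with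
--     # early return, instead of a forward scan maintaining two accumulators.
--     def last_of_type(t):
--         for i in reversed(ISBN):
--             if i["type"] == t:
--                 return i["value"]
--         return ""
--     return (last_of_type("print"), last_of_type("electronic"))
-- ===== Notes on version B (the rewrite author's own statement) =====
-- stated objective: alternative
-- what changed: Replaces the single forward loop with two scalar accumulators by two independent reverse scans that early-return the last entry of each wanted type.
import Mathlib
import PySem

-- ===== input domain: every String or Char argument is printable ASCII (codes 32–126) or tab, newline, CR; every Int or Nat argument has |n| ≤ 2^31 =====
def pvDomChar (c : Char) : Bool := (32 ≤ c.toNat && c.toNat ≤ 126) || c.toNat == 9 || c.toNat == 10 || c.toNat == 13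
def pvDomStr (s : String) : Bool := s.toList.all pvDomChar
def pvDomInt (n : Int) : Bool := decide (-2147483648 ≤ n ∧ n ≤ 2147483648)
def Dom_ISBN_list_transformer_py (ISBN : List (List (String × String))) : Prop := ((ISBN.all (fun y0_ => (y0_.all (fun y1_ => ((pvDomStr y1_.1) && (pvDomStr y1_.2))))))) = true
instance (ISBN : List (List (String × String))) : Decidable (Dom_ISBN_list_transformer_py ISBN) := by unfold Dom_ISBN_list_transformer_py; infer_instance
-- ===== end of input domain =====

-- B replaces A's single forward loop with two scalar accumulators by two independent
-- reverse scans that return the last entry of each wanted type (objective: alternative).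


-- ===== PORT A =====
-- i["type"] / i["value"]: first-match association-list lookup; Pre_ guarantees the key
-- is present wherever A reads it, so the `.getD ""` default is never taken inside Pre_.
def ISBN_list_transformer_py (ISBN : List (List (String × String))) : String × String :=
  ISBN.foldl (fun acc i =>
    let acc1 := if (i.lookup "type").getD "" = "print" then ((i.lookup "value").getD "", acc.2) else acc
    if (i.lookup "type").getD "" = "electronic" then (acc1.1, (i.lookup "value").getD "") else acc1)
    ("", "")

-- ===== PORT B =====
def lastValueOfType : List (List (String × String)) → String → String
  | [], _ => ""
  | i :: rest, t =>
      if (i.lookup "type").getD "" = t then (i.lookup "value").getD ""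
      else lastValueOfType rest t

def ISBN_list_transformer_py_alt (ISBN : List (List (String × String))) : String × String :=
  (lastValueOfType ISBN.reverse "print", lastValueOfType ISBN.reverse "electronic")

-- ===== PRECONDITION & SPEC =====
-- Pre_ excludes exactly the inputs on which A raises KeyError: an element without a
-- "type" key, or a "print"/"electronic"-typed element without a "value" key.
def Pre_ISBN_list_transformer_py (ISBN : List (List (String × String))) : Prop :=
  ∀ i ∈ ISBN, (i.lookup "type").isSome ∧
    ((i.lookup "type").getD "" = "print" ∨ (i.lookup "type").getD "" = "electronic" →
      (i.lookup "value").isSome)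
instance (ISBN : List (List (String × String))) : Decidable (Pre_ISBN_list_transformer_py ISBN) := by unfold Pre_ISBN_list_transformer_py; infer_instance

def pvWitness_ISBN_list_transformer_py : (List (List (String × String))) :=
  [[("type", "print"), ("value", "111")], [("type", "electronic"), ("value", "222")]]

def Spec_ISBN_list_transformer_py (ISBN : List (List (String × String))) (out : String × String) : Prop := out = ISBN_list_transformer_py_alt ISBN
instance (ISBN : List (List (String × String))) (out : String × String) : Decidable (Spec_ISBN_list_transformer_py ISBN out) := by unfold Spec_ISBN_list_transformer_py; infer_instance

-- ===== CLAIM (what is proved, stated in full; the proofs are below) =====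
def Claim_equal_ISBN_list_transformer_py : Prop := ∀ (ISBN : List (List (String × String))), Dom_ISBN_list_transformer_py ISBN → Pre_ISBN_list_transformer_py ISBN → Spec_ISBN_list_transformer_py ISBN (ISBN_list_transformer_py ISBN)

-- ===== LEMMAS AND PROOFS =====

-- B on a snoc'ed list: the appended element is inspected first.
theorem lastValueOfType_snoc (l : List (List (String × String))) (i : List (String × String)) (t : String) :
    lastValueOfType (l ++ [i]).reverse t =
      (if (i.lookup "type").getD "" = t then (i.lookup "value").getD "" else lastValueOfType l.reverse t) := by
  simp [lastValueOfType]

-- A equals B unconditionally (the getD-defaulted ports agree everywhere).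
theorem ports_agree (ISBN : List (List (String × String))) :
    ISBN_list_transformer_py ISBN = ISBN_list_transformer_py_alt ISBN := by
  induction ISBN using List.reverseRecOn with
  | nil => rfl
  | append_singleton l i ih =>
      unfold ISBN_list_transformer_py at *
      rw [List.foldl_append, List.foldl_cons, List.foldl_nil, ih]
      unfold ISBN_list_transformer_py_alt
      rw [lastValueOfType_snoc, lastValueOfType_snoc]
      by_cases hp : (i.lookup "type").getD "" = "print" <;>
        by_cases he : (i.lookup "type").getD "" = "electronic"
      · rw [hp] at he; exact absurd he (by decide)
      all_goals simp [hp, he]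

-- ===== VERDICT (by name: the statement is the Claim_ definition above) =====
theorem ISBN_list_transformer_py_spec : Claim_equal_ISBN_list_transformer_py := by
  intro ISBN _ _
  unfold Spec_ISBN_list_transformer_py
  exact ports_agree ISBN
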